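-- pv_equiv track=rewrite | github.com/BoobooWei/DBA_Python | 00_python_base/exec/11.py | booboo
-- ===== SOURCE A (Python) =====
-- def a(n):
--     result = []
--     num = []
--     for i in range(n):
--         line = []
--         num_line = []
--         for j in range(n):
--             line.append([i, j])
--             num_line.append(0)
--         result.append(line)
--         num.append(num_line)
--     return result, num
--
-- def booboo(n, start):
--     result, num = a(n)
--     for line in result:
--         for x, y in line:
--             if x == n - 1 or y == 0:
--                 z = x + y + 1 + start - 1
--                 num[x][y] = z
--             elif y == n - 1:
--                 z = 2 * n - 1 + (y - x) + start - 1
--                 num[x][y] = z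
--             elif x == 0 and y != 1:
--                 z = 3 * n - 2 + (n - 1 - y) + start - 1
--                 num[x][y] = z
--             elif y == 1 and x == 0:
--                 z = 3 * n - 2 + (n - 1 - y) + start - 1
--                 num[x][y] = z
--
--     c_list = []
--     for c in num:
--         for _num in c:
--             c_list.append(_num)
--     start = max(c_list) + 1
--     return num, start
-- ===== SOURCE B (Python) =====
-- def booboo(n, start):
--     num = [[0] * n for _ in range(n)]
--     c = start
--     for x in range(n):          # left column, top to bottom
--         num[x][0] = c
--         c += 1
--     for y in range(1, n):       # bottom row, left to right
--         num[n - 1][y] = c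
--         c += 1
--     for x in range(n - 2, -1, -1):  # right column, bottom to top
--         num[x][n - 1] = c
--         c += 1
--     for y in range(n - 2, 0, -1):   # top row, right to left
--         num[0][y] = c
--         c += 1
--     flat = [v for row in num for v in row]
--     return num, max(flat) + 1
-- ===== Notes on version B (the rewrite author's own statement) =====
-- stated objective: faster
-- what changed: Instead of scanning all n^2 cells (after first materialising an n^2 matrix of coordinate pairs) and testing a four-branch border condition on each, B walks only the perimeter in four counter-driven segments (left column down, bottom row right, right column up, top row left), writing the running counter directly; the new start is still max of the flattened matrix + 1, as in A. Intended as faster: the advisory a timing run measured ~7-9x (9.23x at n=1024, the largest size both finished); at n=4096 both timed out.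
import Mathlib
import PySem

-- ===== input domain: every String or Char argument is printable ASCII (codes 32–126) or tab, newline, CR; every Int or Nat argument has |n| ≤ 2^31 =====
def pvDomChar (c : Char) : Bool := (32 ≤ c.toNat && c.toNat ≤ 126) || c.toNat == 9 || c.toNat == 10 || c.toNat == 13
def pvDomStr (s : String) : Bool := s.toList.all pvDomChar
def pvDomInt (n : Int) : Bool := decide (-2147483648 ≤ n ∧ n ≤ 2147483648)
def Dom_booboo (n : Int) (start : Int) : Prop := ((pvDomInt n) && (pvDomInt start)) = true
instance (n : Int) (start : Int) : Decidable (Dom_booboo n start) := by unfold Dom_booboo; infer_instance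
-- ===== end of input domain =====

-- B replaces A's full n×n scan (built on a materialised matrix of coordinate pairs, with a
-- four-branch border test at every cell) by a counter-driven walk of the four perimeter
-- segments only; intended as faster (the advisory timing run measured ~7-9x at sizes up
-- to n=1024; at n=4096 both implementations exceeded the probe's time limit).

-- ===== PORT A =====

-- `num[x][y] = v`: exact for the indices the admitted inputs reach (always 0 ≤ x,y < n here,
-- so the reads/writes are in range; pyGetD/pySetD are the Python-exact primitives).
def boobooSet2 (m : List (List Int)) (x y v : Int) : List (List Int) :=
  PySem.List.pySetD m x (PySem.List.pySetD (PySem.List.pyGetD m x []) y v)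

-- helper a(n): builds the coordinate-pair matrix and the zero matrix by appends
def boobooA (n : Int) : List (List (Int × Int)) × List (List Int) :=
  (PySem.List.pyRange 0 n 1).foldl
    (fun acc i =>
      let line := (PySem.List.pyRange 0 n 1).foldl (fun l j => l ++ [(i, j)]) []
      let numLine := (PySem.List.pyRange 0 n 1).foldl (fun (l : List Int) _ => l ++ [(0 : Int)]) []
      (acc.1 ++ [line], acc.2 ++ [numLine]))
    ([], [])

def booboo (n : Int) (start : Int) : List (List Int) × Int :=
  let rn := boobooA n
  let num :=
    rn.1.foldl (fun num line =>
      line.foldl (fun num xy =>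
        let x := xy.1
        let y := xy.2
        if x == n - 1 || y == 0 then
          boobooSet2 num x y (x + y + 1 + start - 1)
        else if y == n - 1 then
          boobooSet2 num x y (2 * n - 1 + (y - x) + start - 1)
        else if x == 0 && !(y == 1) then
          boobooSet2 num x y (3 * n - 2 + (n - 1 - y) + start - 1)
        else if y == 1 && x == 0 then
          boobooSet2 num x y (3 * n - 2 + (n - 1 - y) + start - 1)
        else num) num) rn.2
  let cList := num.foldl (fun cl c => c.foldl (fun (cl : List Int) v => cl ++ [v]) cl) []
  -- max(c_list) raises ValueError when c_list is empty (n ≤ 0): those inputs are outside Pre_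
  (num, (PySem.List.max? cList (fun v => v)).getD 0 + 1)

-- ===== PORT B =====

def booboo_alt (n : Int) (start : Int) : List (List Int) × Int :=
  let num0 := (PySem.List.pyRange 0 n 1).map (fun _ => PySem.List.pyRepeat [(0 : Int)] n)
  let s1 := (PySem.List.pyRange 0 n 1).foldl
    (fun s x => (boobooSet2 s.1 x 0 s.2, s.2 + 1)) (num0, start)
  let s2 := (PySem.List.pyRange 1 n 1).foldl
    (fun s y => (boobooSet2 s.1 (n - 1) y s.2, s.2 + 1)) s1
  let s3 := (PySem.List.pyRange (n - 2) (-1) (-1)).foldl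
    (fun s x => (boobooSet2 s.1 x (n - 1) s.2, s.2 + 1)) s2
  let s4 := (PySem.List.pyRange (n - 2) 0 (-1)).foldl
    (fun s y => (boobooSet2 s.1 0 y s.2, s.2 + 1)) s3
  let num := s4.1
  let flat := num.flatMap (fun row => row)
  -- max(flat) raises ValueError when flat is empty (n ≤ 0): those inputs are outside Pre_
  (num, (PySem.List.max? flat (fun v => v)).getD 0 + 1)

-- ===== PRECONDITION & SPEC =====
-- Pre_ excludes n ≤ 0, where both A and B raise ValueError (max() of an empty sequence).
def Pre_booboo (n : Int) (start : Int) : Prop := 1 ≤ n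
instance (n : Int) (start : Int) : Decidable (Pre_booboo n start) := by unfold Pre_booboo; infer_instance
def pvWitness_booboo : Int × Int := (3, 5)

def Spec_booboo (n : Int) (start : Int) (out : List (List Int) × Int) : Prop := out = booboo_alt n start
instance (n : Int) (start : Int) (out : List (List Int) × Int) : Decidable (Spec_booboo n start out) := by unfold Spec_booboo; infer_instance

-- ===== CLAIM (what is proved, stated in full; the proofs are below) =====
def Claim_equal_booboo : Prop := ∀ (n : Int) (start : Int), Dom_booboo n start → Pre_booboo n start → Spec_booboo n start (booboo n start)

-- ===== LEMMAS AND PROOFS =====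

-- entry read m[p][q] (with harmless defaults; only used at in-range nonnegative p,q)
def entE (m : List (List Int)) (p q : Int) : Int :=
  PySem.List.pyGetD (PySem.List.pyGetD m p []) q 0

-- apply a list of assignments ((x,y),v) meaning m[x][y] = v
def applyA (L : List ((Int × Int) × Int)) (m : List (List Int)) : List (List Int) :=
  L.foldl (fun m a => boobooSet2 m a.1.1 a.1.2 a.2) m

-- shape: n rows of n entries
def Shp (n : Int) (m : List (List Int)) : Prop :=
  (m.length : Int) = n ∧ ∀ r ∈ m, (r.length : Int) = n

-- the cell filter
def filt (p q : Int) (a : (Int × Int) × Int) : Bool := a.1.1 == p && a.1.2 == q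

-- the conditional assignment A performs at cell (i,j)
def gA (n start i j : Int) : Option ((Int × Int) × Int) :=
  if i = n - 1 ∨ j = 0 then some ((i, j), i + j + 1 + start - 1)
  else if j = n - 1 then some ((i, j), 2 * n - 1 + (j - i) + start - 1)
  else if i = 0 ∧ ¬(j = 1) then some ((i, j), 3 * n - 2 + (n - 1 - j) + start - 1)
  else if j = 1 ∧ i = 0 then some ((i, j), 3 * n - 2 + (n - 1 - j) + start - 1)
  else none

-- A's assignment list and zero matrix
def LAdef (n start : Int) : List ((Int × Int) × Int) :=
  ((PySem.List.pyRange 0 n 1).map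
    (fun i => (PySem.List.pyRange 0 n 1).filterMap (fun j => gA n start i j))).flatten

def ZAdef (n : Int) : List (List Int) :=
  (PySem.List.pyRange 0 n 1).map (fun _ => (PySem.List.pyRange 0 n 1).map (fun _ => (0 : Int)))

-- B's assignment list (four perimeter segments) and zero matrix
def S1def (n start : Int) : List ((Int × Int) × Int) :=
  (PySem.List.pyRange 0 n 1).map (fun x => ((x, (0 : Int)), start + (x - 0)))
def S2def (n start : Int) : List ((Int × Int) × Int) :=
  (PySem.List.pyRange 1 n 1).map (fun y => ((n - 1, y), start + (n - 0) + (y - 1)))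
def S3def (n start : Int) : List ((Int × Int) × Int) :=
  (PySem.List.pyRange (n - 2) (-1) (-1)).map
    (fun x => ((x, n - 1), start + (n - 0) + (n - 1) + (n - 2 - x)))
def S4def (n start : Int) : List ((Int × Int) × Int) :=
  (PySem.List.pyRange (n - 2) 0 (-1)).map
    (fun y => (((0 : Int), y), start + (n - 0) + (n - 1) + (n - 2 - -1) + (n - 2 - y)))
def LBdef (n start : Int) : List ((Int × Int) × Int) :=
  S1def n start ++ S2def n start ++ S3def n start ++ S4def n start

def ZBdef (n : Int) : List (List Int) :=
  (PySem.List.pyRange 0 n 1).map (fun _ => List.replicate n.toNat (0 : Int))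

theorem shp_set2 {n : Int} {m : List (List Int)} (h : Shp n m) (x y v : Int)
    (hx : 0 ≤ x) (hy : 0 ≤ y) : Shp n (boobooSet2 m x y v) := by
  obtain ⟨h1, h2⟩ := h
  unfold boobooSet2
  rw [PySem.List.pySetD_of_nonneg _ _ hx, PySem.List.pyGetD_of_nonneg _ _ hx,
      PySem.List.pySetD_of_nonneg _ _ hy]
  by_cases hxl : x.toNat < m.length
  · refine ⟨by simpa using h1, ?_⟩
    intro r hr
    rcases List.mem_or_eq_of_mem_set hr with hr' | hr'
    · exact h2 r hr'
    · subst hr'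
      rw [List.length_set, List.getD_eq_getElem _ _ hxl]
      exact h2 _ (List.getElem_mem hxl)
  · rw [List.set_eq_of_length_le (by omega)]
    exact ⟨h1, h2⟩

theorem getD_set_ne {α : Type} (l : List α) (i j : Nat) (a d : α) (h : i ≠ j) :
    (l.set i a).getD j d = l.getD j d := by
  simp [List.getD_eq_getElem?_getD, h]

theorem getD_set_self {α : Type} (l : List α) (i : Nat) (a d : α) (h : i < l.length) :
    (l.set i a).getD i d = a := by
  simp [List.getD_eq_getElem?_getD, h]

theorem entE_set2_ne {m : List (List Int)} {x y p q : Int} (v : Int)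
    (hx : 0 ≤ x) (hy : 0 ≤ y) (hp : 0 ≤ p) (hq : 0 ≤ q)
    (hne : ¬(x = p ∧ y = q)) : entE (boobooSet2 m x y v) p q = entE m p q := by
  unfold entE boobooSet2
  rw [PySem.List.pySetD_of_nonneg _ _ hx, PySem.List.pyGetD_of_nonneg _ _ hx,
      PySem.List.pySetD_of_nonneg _ _ hy, PySem.List.pyGetD_of_nonneg _ _ hp,
      PySem.List.pyGetD_of_nonneg _ _ hp, PySem.List.pyGetD_of_nonneg _ _ hq,
      PySem.List.pyGetD_of_nonneg _ _ hq]
  by_cases hpx : x.toNat = p.toNat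
  · have hxp : x = p := by omega
    have hyq : ¬ y = q := fun hyq => hne ⟨hxp, hyq⟩
    have hyq' : y.toNat ≠ q.toNat := by omega
    by_cases hxl : x.toNat < m.length
    · rw [hpx] at hxl ⊢
      rw [getD_set_self m p.toNat _ [] hxl, getD_set_ne _ y.toNat q.toNat v 0 hyq']
    · rw [List.set_eq_of_length_le (by omega)]
  · rw [getD_set_ne m x.toNat p.toNat _ [] hpx]

theorem entE_set2_self {n : Int} {m : List (List Int)} {p q : Int} (v : Int)
    (h : Shp n m) (hp : 0 ≤ p) (hpn : p < n) (hq : 0 ≤ q) (hqn : q < n) :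
    entE (boobooSet2 m p q v) p q = v := by
  obtain ⟨h1, h2⟩ := h
  have hpl : p.toNat < m.length := by omega
  unfold entE boobooSet2
  rw [PySem.List.pySetD_of_nonneg _ _ hp, PySem.List.pyGetD_of_nonneg _ _ hp,
      PySem.List.pySetD_of_nonneg _ _ hq, PySem.List.pyGetD_of_nonneg _ _ hp,
      PySem.List.pyGetD_of_nonneg _ _ hq]
  have hrow : m.getD p.toNat [] = m[p.toNat] := List.getD_eq_getElem _ _ hpl
  have hql : q.toNat < (m.getD p.toNat []).length := by
    rw [hrow]
    have := h2 _ (List.getElem_mem hpl)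
    omega
  rw [getD_set_self m p.toNat _ [] hpl, getD_set_self _ q.toNat v 0 hql]

theorem applyA_miss {p q : Int} (hp : 0 ≤ p) (hq : 0 ≤ q) :
    ∀ (L : List ((Int × Int) × Int)) (m : List (List Int)),
    (∀ a ∈ L, 0 ≤ a.1.1 ∧ 0 ≤ a.1.2) →
    L.filter (filt p q) = [] →
    entE (applyA L m) p q = entE m p q := by
  intro L
  induction L with
  | nil => intro m _ _; rfl
  | cons a t ih =>
    intro m hrange hfil
    rw [List.filter_eq_nil_iff] at hfil
    have ha := hfil a (List.mem_cons_self)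
    have hane : ¬(a.1.1 = p ∧ a.1.2 = q) := by
      intro ⟨h1, h2⟩
      apply ha
      simp [filt, h1, h2]
    have h0 := hrange a (List.mem_cons_self)
    show entE (applyA t (boobooSet2 m a.1.1 a.1.2 a.2)) p q = entE m p q
    rw [ih _ (fun b hb => hrange b (List.mem_cons_of_mem _ hb))
        (List.filter_eq_nil_iff.mpr (fun b hb => hfil b (List.mem_cons_of_mem _ hb)))]
    exact entE_set2_ne _ h0.1 h0.2 hp hq hane

theorem applyA_hit {n p q : Int} (hp : 0 ≤ p) (hpn : p < n) (hq : 0 ≤ q) (hqn : q < n) :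
    ∀ (L : List ((Int × Int) × Int)) (m : List (List Int)) (v : Int),
    Shp n m →
    (∀ a ∈ L, 0 ≤ a.1.1 ∧ 0 ≤ a.1.2) →
    L.filter (filt p q) = [((p, q), v)] →
    entE (applyA L m) p q = v := by
  intro L
  induction L with
  | nil => intro m v _ _ hfil; simp at hfil
  | cons a t ih =>
    intro m v hshp hrange hfil
    have h0 := hrange a (List.mem_cons_self)
    rw [List.filter_cons] at hfil
    by_cases ha : filt p q a = true
    · rw [if_pos ha] at hfil
      have hav : a = ((p, q), v) ∧ t.filter (filt p q) = [] := by
        constructor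
        · exact (List.cons_eq_cons.mp hfil).1
        · exact (List.cons_eq_cons.mp hfil).2
      show entE (applyA t (boobooSet2 m a.1.1 a.1.2 a.2)) p q = v
      rw [applyA_miss hp hq t _ (fun b hb => hrange b (List.mem_cons_of_mem _ hb)) hav.2]
      rw [hav.1]
      exact entE_set2_self v hshp hp hpn hq hqn
    · rw [if_neg ha] at hfil
      show entE (applyA t (boobooSet2 m a.1.1 a.1.2 a.2)) p q = v
      exact ih _ v (shp_set2 hshp _ _ _ h0.1 h0.2)
        (fun b hb => hrange b (List.mem_cons_of_mem _ hb)) hfil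

theorem shp_applyA {n : Int} :
    ∀ (L : List ((Int × Int) × Int)) (m : List (List Int)),
    Shp n m → (∀ a ∈ L, 0 ≤ a.1.1 ∧ 0 ≤ a.1.2) → Shp n (applyA L m) := by
  intro L
  induction L with
  | nil => intro m h _; exact h
  | cons a t ih =>
    intro m h hrange
    have h0 := hrange a (List.mem_cons_self)
    exact ih _ (shp_set2 h _ _ _ h0.1 h0.2)
      (fun b hb => hrange b (List.mem_cons_of_mem _ hb))

theorem entE_natCast (m : List (List Int)) (p q : Nat) :
    entE m p q = (m.getD p []).getD q 0 := by
  unfold entE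
  rw [PySem.List.pyGetD_natCast, PySem.List.pyGetD_natCast]

-- two matrices of shape n with equal entries are equal
theorem shp_ext {n : Int} {m1 m2 : List (List Int)} (h1 : Shp n m1) (h2 : Shp n m2)
    (h : ∀ p q : Nat, p < n.toNat → q < n.toNat → entE m1 p q = entE m2 p q) :
    m1 = m2 := by
  obtain ⟨h1l, h1r⟩ := h1
  obtain ⟨h2l, h2r⟩ := h2
  apply List.ext_getElem (by omega)
  intro i hi1 hi2
  have hr1 : m1[i].length = n.toNat := by
    have := h1r _ (List.getElem_mem hi1); omega
  have hr2 : m2[i].length = n.toNat := by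
    have := h2r _ (List.getElem_mem hi2); omega
  apply List.ext_getElem (by omega)
  intro j hj1 hj2
  have hin : i < n.toNat := by omega
  have hjn : j < n.toNat := by omega
  have := h i j hin hjn
  rw [entE_natCast, entE_natCast, List.getD_eq_getElem _ _ hi1, List.getD_eq_getElem _ _ hi2,
      List.getD_eq_getElem _ _ hj1, List.getD_eq_getElem _ _ hj2] at this
  exact this

-- a fold with a `match g x with some/none` step is a fold over the filterMap
theorem foldl_filterMap_opt {α β γ : Type} (g : α → Option β) (h : γ → β → γ) :
    ∀ (l : List α) (m : γ),
    l.foldl (fun m x => match g x with | some a => h m a | none => m) m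
      = (l.filterMap g).foldl h m := by
  intro l
  induction l with
  | nil => intro m; rfl
  | cons x t ih =>
    intro m
    rw [List.filterMap_cons]
    cases hg : g x <;> simp only [List.foldl_cons, hg, ih, List.foldl_cons]

-- reduction of port A to assignment-list form
theorem booboo_eq (n start : Int) :
    booboo n start
      = (applyA (LAdef n start) (ZAdef n),
         (PySem.List.max? (applyA (LAdef n start) (ZAdef n)).flatten (fun v => v)).getD 0 + 1) := by
  unfold booboo boobooA
  simp only [PySem.List.foldl_prod_mk
      (f := fun (acc : List (List (Int × Int))) (i : Int) =>
        acc ++ [(PySem.List.pyRange 0 n 1).foldl (fun l j => l ++ [(i, j)]) []])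
      (g := fun (acc : List (List Int)) (_ : Int) =>
        acc ++ [(PySem.List.pyRange 0 n 1).foldl (fun (l : List Int) _ => l ++ [(0 : Int)]) []])]
  simp only [PySem.List.foldl_append_singleton_eq_map, List.nil_append]
  have hmat :
      ((PySem.List.pyRange 0 n 1).map
          (fun i => (PySem.List.pyRange 0 n 1).map (fun j => (i, j)))).foldl
        (fun num line =>
          line.foldl (fun num xy =>
            if xy.1 == n - 1 || xy.2 == 0 then
              boobooSet2 num xy.1 xy.2 (xy.1 + xy.2 + 1 + start - 1)
            else if xy.2 == n - 1 then
              boobooSet2 num xy.1 xy.2 (2 * n - 1 + (xy.2 - xy.1) + start - 1)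
            else if xy.1 == 0 && !(xy.2 == 1) then
              boobooSet2 num xy.1 xy.2 (3 * n - 2 + (n - 1 - xy.2) + start - 1)
            else if xy.2 == 1 && xy.1 == 0 then
              boobooSet2 num xy.1 xy.2 (3 * n - 2 + (n - 1 - xy.2) + start - 1)
            else num) num)
        (ZAdef n)
      = applyA (LAdef n start) (ZAdef n) := by
    rw [List.foldl_map]
    unfold LAdef applyA
    rw [List.foldl_flatten, List.foldl_map]
    apply PySem.List.foldl_congr_mem
    intro m i _
    rw [List.foldl_map]
    rw [← foldl_filterMap_opt (fun j => gA n start i j)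
      (fun m (a : (Int × Int) × Int) => boobooSet2 m a.1.1 a.1.2 a.2) _ m]
    apply PySem.List.foldl_congr_mem
    intro m' j _
    dsimp only
    simp only [gA, Bool.or_eq_true, beq_iff_eq, Bool.and_eq_true, Bool.not_eq_eq_eq_not,
      Bool.not_true, beq_eq_false_iff_ne, ne_eq]
    split_ifs <;> rfl
  simp only [ZAdef] at hmat
  rw [hmat]
  congr 1
  simp only [List.map_id']
  rw [PySem.List.foldl_append_eq_flatten, List.nil_append]
  rfl

-- counter-fold lemmas: a fold carrying (matrix, counter) is a matrix fold with explicit values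
theorem seg_fold_up (f : List (List Int) → Int → Int → List (List Int)) (a b : Int) (hab : a ≤ b) :
    ∀ (m : List (List Int)) (c : Int),
    (PySem.List.pyRange a b 1).foldl (fun s x => (f s.1 x s.2, s.2 + 1)) (m, c)
      = ((PySem.List.pyRange a b 1).foldl (fun m x => f m x (c + (x - a))) m, c + (b - a)) := by
  have H : ∀ (k : Nat) (a c : Int) (m : List (List Int)), (b - a).toNat = k → a ≤ b →
      (PySem.List.pyRange a b 1).foldl (fun s x => (f s.1 x s.2, s.2 + 1)) (m, c)
        = ((PySem.List.pyRange a b 1).foldl (fun m x => f m x (c + (x - a))) m, c + (b - a)) := by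
    intro k
    induction k with
    | zero =>
      intro a c m hk hab
      have hba : b ≤ a := by omega
      rw [PySem.List.pyRange_one_eq_nil hba]
      simp only [List.foldl_nil]
      have : b - a = 0 := by omega
      rw [this]; ring_nf
    | succ k ih =>
      intro a c m hk hab
      have hlt : a < b := by omega
      rw [PySem.List.pyRange_one_cons hlt]
      simp only [List.foldl_cons]
      have h1 : f m a (c + (a - a)) = f m a c := by ring_nf
      rw [ih (a + 1) (c + 1) (f m a c) (by omega) (by omega)]
      rw [h1]
      have hfun : (fun (acc : List (List Int)) (x : Int) => f acc x (c + 1 + (x - (a + 1))))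
          = fun acc x => f acc x (c + (x - a)) := by
        funext acc x
        have : c + 1 + (x - (a + 1)) = c + (x - a) := by ring
        rw [this]
      rw [hfun]
      have h2 : c + 1 + (b - (a + 1)) = c + (b - a) := by ring
      rw [h2]
  intro m c
  exact H (b - a).toNat a c m rfl hab

theorem seg_fold_down (f : List (List Int) → Int → Int → List (List Int)) (a b : Int) (hba : b ≤ a) :
    ∀ (m : List (List Int)) (c : Int),
    (PySem.List.pyRange a b (-1)).foldl (fun s x => (f s.1 x s.2, s.2 + 1)) (m, c)
      = ((PySem.List.pyRange a b (-1)).foldl (fun m x => f m x (c + (a - x))) m, c + (a - b)) := by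
  have H : ∀ (k : Nat) (a c : Int) (m : List (List Int)), (a - b).toNat = k → b ≤ a →
      (PySem.List.pyRange a b (-1)).foldl (fun s x => (f s.1 x s.2, s.2 + 1)) (m, c)
        = ((PySem.List.pyRange a b (-1)).foldl (fun m x => f m x (c + (a - x))) m, c + (a - b)) := by
    intro k
    induction k with
    | zero =>
      intro a c m hk hba'
      have hab : a ≤ b := by omega
      rw [PySem.List.pyRange_neg_one_eq_nil hab]
      simp only [List.foldl_nil]
      have : a - b = 0 := by omega
      rw [this]; ring_nf
    | succ k ih =>
      intro a c m hk hba'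
      have hlt : b < a := by omega
      rw [PySem.List.pyRange_neg_one_cons hlt]
      simp only [List.foldl_cons]
      have h1 : f m a (c + (a - a)) = f m a c := by ring_nf
      rw [ih (a - 1) (c + 1) (f m a c) (by omega) (by omega)]
      rw [h1]
      have hfun : (fun (acc : List (List Int)) (x : Int) => f acc x (c + 1 + (a - 1 - x)))
          = fun acc x => f acc x (c + (a - x)) := by
        funext acc x
        have : c + 1 + (a - 1 - x) = c + (a - x) := by ring
        rw [this]
      rw [hfun]
      have h2 : c + 1 + (a - 1 - b) = c + (a - b) := by ring
      rw [h2]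
  intro m c
  exact H (a - b).toNat a c m rfl hba

theorem booboo_alt_eq (n start : Int) (hn : 1 ≤ n) :
    booboo_alt n start
      = (applyA (LBdef n start) (ZBdef n),
         (PySem.List.max? (applyA (LBdef n start) (ZBdef n)).flatten (fun v => v)).getD 0 + 1) := by
  have hfold : applyA (LBdef n start) (ZBdef n)
      = (PySem.List.pyRange (n - 2) 0 (-1)).foldl
          (fun m y => boobooSet2 m 0 y (start + (n - 0) + (n - 1) + (n - 2 - -1) + (n - 2 - y)))
          ((PySem.List.pyRange (n - 2) (-1) (-1)).foldl
            (fun m x => boobooSet2 m x (n - 1) (start + (n - 0) + (n - 1) + (n - 2 - x)))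
            ((PySem.List.pyRange 1 n 1).foldl
              (fun m y => boobooSet2 m (n - 1) y (start + (n - 0) + (y - 1)))
              ((PySem.List.pyRange 0 n 1).foldl
                (fun m x => boobooSet2 m x 0 (start + (x - 0)))
                (ZBdef n)))) := by
    unfold applyA LBdef S1def S2def S3def S4def
    rw [List.foldl_append, List.foldl_append, List.foldl_append]
    simp only [List.foldl_map]
  unfold booboo_alt
  simp only [PySem.List.pyRepeat_singleton]
  rw [seg_fold_up (fun m x c => boobooSet2 m x 0 c) 0 n (by omega)]
  rw [seg_fold_up (fun m y c => boobooSet2 m (n - 1) y c) 1 n (by omega)]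
  rw [seg_fold_down (fun m x c => boobooSet2 m x (n - 1) c) (n - 2) (-1) (by omega)]
  by_cases h4 : 2 ≤ n
  · rw [seg_fold_down (fun m y c => boobooSet2 m 0 y c) (n - 2) 0 (by omega)]
    rw [hfold]
    rw [List.flatMap_id']
    unfold ZBdef
    rfl
  · have hnil : PySem.List.pyRange (n - 2) 0 (-1) = [] :=
      PySem.List.pyRange_neg_one_eq_nil (by omega)
    rw [hfold, hnil]
    simp only [List.foldl_nil]
    rw [List.flatMap_id']
    unfold ZBdef
    rfl

-- mem/range facts
theorem gA_fst {n start i j : Int} {a : (Int × Int) × Int}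
    (h : gA n start i j = some a) : a.1 = (i, j) := by
  unfold gA at h
  split_ifs at h <;> · simp only [Option.some.injEq] at h; rw [← h]

theorem LA_range (n start : Int) :
    ∀ a ∈ LAdef n start, 0 ≤ a.1.1 ∧ 0 ≤ a.1.2 := by
  intro a ha
  unfold LAdef at ha
  rw [List.mem_flatten] at ha
  obtain ⟨l, hl, hal⟩ := ha
  rw [List.mem_map] at hl
  obtain ⟨i, hi, rfl⟩ := hl
  rw [List.mem_filterMap] at hal
  obtain ⟨j, hj, hgj⟩ := hal
  rw [PySem.List.mem_pyRange_one] at hi hj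
  have := gA_fst hgj
  rw [this]
  exact ⟨hi.1, hj.1⟩

theorem LB_range (n start : Int) (hn : 1 ≤ n) :
    ∀ a ∈ LBdef n start, 0 ≤ a.1.1 ∧ 0 ≤ a.1.2 := by
  intro a ha
  unfold LBdef S1def S2def S3def S4def at ha
  simp only [List.mem_append, List.mem_map] at ha
  rcases ha with ((⟨x, hx, rfl⟩ | ⟨y, hy, rfl⟩) | ⟨x, hx, rfl⟩) | ⟨y, hy, rfl⟩ <;>
    first
    | (rw [PySem.List.mem_pyRange_one] at *; constructor <;> simp <;> omega)
    | (rw [PySem.List.mem_pyRange_neg_one] at *; constructor <;> simp <;> omega)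

theorem shp_ZA (n : Int) (hn : 0 ≤ n) : Shp n (ZAdef n) := by
  unfold ZAdef Shp
  constructor
  · rw [List.length_map, PySem.List.length_pyRange_one]; omega
  · intro r hr
    rw [List.mem_map] at hr
    obtain ⟨i, _, rfl⟩ := hr
    rw [List.length_map, PySem.List.length_pyRange_one]; omega

theorem shp_ZB (n : Int) (hn : 0 ≤ n) : Shp n (ZBdef n) := by
  unfold ZBdef Shp
  constructor
  · rw [List.length_map, PySem.List.length_pyRange_one]; omega
  · intro r hr
    rw [List.mem_map] at hr
    obtain ⟨i, _, rfl⟩ := hr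
    rw [List.length_replicate]; omega

theorem entE_zero (m : List (List Int)) (p q : Nat)
    (h : ∀ r ∈ m, ∀ v ∈ r, v = 0) : entE m p q = 0 := by
  rw [entE_natCast]
  rcases Nat.lt_or_ge p m.length with hp | hp
  · rw [List.getD_eq_getElem _ _ hp]
    rcases Nat.lt_or_ge q m[p].length with hq | hq
    · rw [List.getD_eq_getElem _ _ hq]
      exact h _ (List.getElem_mem hp) _ (List.getElem_mem hq)
    · rw [List.getD_eq_default _ _ hq]
  · rw [List.getD_eq_default _ _ hp]
    simp

-- splitting pyRange filters
theorem filter_range_up_nil (a b : Int) (pr : Int → Bool)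
    (h : ∀ x, a ≤ x → x < b → ¬ pr x = true) :
    (PySem.List.pyRange a b 1).filter pr = [] := by
  rw [List.filter_eq_nil_iff]
  intro x hx
  rw [PySem.List.mem_pyRange_one] at hx
  exact h x hx.1 hx.2

theorem filter_range_up_single (a b t : Int) (pr : Int → Bool) (hat : a ≤ t) (htb : t < b)
    (hpr : ∀ x, a ≤ x → x < b → (pr x = true ↔ x = t)) :
    (PySem.List.pyRange a b 1).filter pr = [t] := by
  rw [PySem.List.pyRange_one_append a t b hat (le_of_lt htb),
      PySem.List.pyRange_one_cons htb, List.filter_append, List.filter_cons]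
  rw [filter_range_up_nil a t pr (fun x h1 h2 => by
    intro hx
    have := (hpr x h1 (by omega)).mp hx
    omega)]
  rw [if_pos ((hpr t hat htb).mpr rfl)]
  rw [filter_range_up_nil (t + 1) b pr (fun x h1 h2 => by
    intro hx
    have := (hpr x (by omega) h2).mp hx
    omega)]
  rfl

theorem filter_range_down_nil (a b : Int) (pr : Int → Bool)
    (h : ∀ x, b < x → x ≤ a → ¬ pr x = true) :
    (PySem.List.pyRange a b (-1)).filter pr = [] := by
  rw [List.filter_eq_nil_iff]
  intro x hx
  rw [PySem.List.mem_pyRange_neg_one] at hx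
  exact h x hx.1 hx.2

theorem filter_range_down_single (a b t : Int) (pr : Int → Bool) (hbt : b < t) (hta : t ≤ a)
    (hpr : ∀ x, b < x → x ≤ a → (pr x = true ↔ x = t)) :
    (PySem.List.pyRange a b (-1)).filter pr = [t] := by
  rw [PySem.List.pyRange_neg_one_eq_reverse, List.filter_reverse]
  rw [filter_range_up_single (b + 1) (a + 1) t pr (by omega) (by omega)
    (fun x h1 h2 => hpr x (by omega) (by omega))]
  rfl

theorem flatten_single {β : Type} (b p : Int) (f : Int → List β) (hp : 0 ≤ p) (hpb : p < b)
    (h0 : ∀ i, 0 ≤ i → i < b → i ≠ p → f i = []) :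
    ((PySem.List.pyRange 0 b 1).map f).flatten = f p := by
  rw [PySem.List.pyRange_one_append 0 p b hp (le_of_lt hpb),
      PySem.List.pyRange_one_cons hpb]
  simp only [List.map_append, List.map_cons, List.flatten_append, List.flatten_cons]
  have hl : ((PySem.List.pyRange 0 p 1).map f).flatten = [] := by
    rw [List.flatten_eq_nil_iff]
    intro l hl
    rw [List.mem_map] at hl
    obtain ⟨i, hi, rfl⟩ := hl
    rw [PySem.List.mem_pyRange_one] at hi
    exact h0 i hi.1 (by omega) (by omega)
  have hr : ((PySem.List.pyRange (p + 1) b 1).map f).flatten = [] := by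
    rw [List.flatten_eq_nil_iff]
    intro l hl
    rw [List.mem_map] at hl
    obtain ⟨i, hi, rfl⟩ := hl
    rw [PySem.List.mem_pyRange_one] at hi
    exact h0 i (by omega) hi.2 (by omega)
  rw [hl, hr, List.nil_append, List.append_nil]

theorem filterMap_single {β : Type} (b q : Int) (g : Int → Option β) (hq : 0 ≤ q) (hqb : q < b)
    (h0 : ∀ j, 0 ≤ j → j < b → j ≠ q → g j = none) :
    (PySem.List.pyRange 0 b 1).filterMap g = (g q).toList := by
  rw [PySem.List.pyRange_one_append 0 q b hq (le_of_lt hqb),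
      PySem.List.pyRange_one_cons hqb]
  rw [List.filterMap_append, List.filterMap_cons]
  have hl : (PySem.List.pyRange 0 q 1).filterMap g = [] := by
    rw [List.filterMap_eq_nil_iff]
    intro j hj
    rw [PySem.List.mem_pyRange_one] at hj
    exact h0 j hj.1 (by omega) (by omega)
  have hr : (PySem.List.pyRange (q + 1) b 1).filterMap g = [] := by
    rw [List.filterMap_eq_nil_iff]
    intro j hj
    rw [PySem.List.mem_pyRange_one] at hj
    exact h0 j (by omega) hj.2 (by omega)
  cases hg : g q <;> simp [hl, hr]

-- the filtered assignment of one cell in A's list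
theorem gA_filter_ne (n start p q i j : Int) (h : i ≠ p ∨ j ≠ q) :
    Option.filter (filt p q) (gA n start i j) = none := by
  unfold gA
  split_ifs <;>
    simp only [Option.filter, filt, Bool.and_eq_true, beq_iff_eq] <;>
    first
      | rfl
      | (rw [if_neg]; intro ⟨h1, h2⟩; omega)

theorem filter_LA (n start p q : Int) (hp : 0 ≤ p) (hpn : p < n) (hq : 0 ≤ q) (hqn : q < n) :
    (LAdef n start).filter (filt p q)
      = (Option.filter (filt p q) (gA n start p q)).toList := by
  unfold LAdef
  rw [List.filter_flatten, List.map_map]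
  have hrw : (List.filter (filt p q) ∘ fun i =>
      (PySem.List.pyRange 0 n 1).filterMap fun j => gA n start i j)
      = fun i => (PySem.List.pyRange 0 n 1).filterMap
          (fun j => Option.filter (filt p q) (gA n start i j)) := by
    funext i
    simp only [Function.comp_apply, List.filter_filterMap]
  rw [hrw]
  rw [flatten_single n p _ hp hpn (fun i _ _ hip => by
    rw [List.filterMap_eq_nil_iff]
    intro j _
    exact gA_filter_ne n start p q i j (Or.inl hip))]
  exact filterMap_single n q _ hq hqn (fun j _ _ hjq =>
    gA_filter_ne n start p q p j (Or.inr hjq))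

-- per-entry agreement of the two assignment lists
theorem filters_agree (n start p q : Int) (hn : 1 ≤ n)
    (hp : 0 ≤ p) (hpn : p < n) (hq : 0 ≤ q) (hqn : q < n) :
    (LAdef n start).filter (filt p q) = (LBdef n start).filter (filt p q) := by
  rw [filter_LA n start p q hp hpn hq hqn]
  unfold LBdef S1def S2def S3def S4def
  rw [List.filter_append, List.filter_append, List.filter_append,
      List.filter_map, List.filter_map, List.filter_map, List.filter_map]
  unfold gA
  by_cases hq0 : q = 0
  · subst hq0
    rw [filter_range_up_single 0 n p _ hp hpn
        (fun x h1 h2 => by simp [filt, Function.comp] <;> omega)]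
    rw [filter_range_up_nil 1 n _
        (fun y h1 h2 => by simp [filt, Function.comp] <;> omega)]
    rw [filter_range_down_nil (n - 2) (-1) _
        (fun x h1 h2 => by simp [filt, Function.comp] <;> omega)]
    rw [filter_range_down_nil (n - 2) 0 _
        (fun y h1 h2 => by simp [filt, Function.comp] <;> omega)]
    rw [if_pos (Or.inr rfl)]
    simp [Option.filter, filt, Prod.ext_iff] <;> omega
  · by_cases hpn1 : p = n - 1
    · subst hpn1
      rw [filter_range_up_nil 0 n _
          (fun x h1 h2 => by simp [filt, Function.comp] <;> omega)]
      rw [filter_range_up_single 1 n q _ (by omega) hqn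
          (fun y h1 h2 => by simp [filt, Function.comp] <;> omega)]
      rw [filter_range_down_nil (n - 2) (-1) _
          (fun x h1 h2 => by simp [filt, Function.comp] <;> omega)]
      rw [filter_range_down_nil (n - 2) 0 _
          (fun y h1 h2 => by simp [filt, Function.comp] <;> omega)]
      rw [if_pos (Or.inl rfl)]
      simp [Option.filter, filt, Prod.ext_iff] <;> omega
    · by_cases hqn1 : q = n - 1
      · subst hqn1
        rw [filter_range_up_nil 0 n _
            (fun x h1 h2 => by simp [filt, Function.comp] <;> omega)]
        rw [filter_range_up_nil 1 n _
            (fun y h1 h2 => by simp [filt, Function.comp] <;> omega)]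
        rw [filter_range_down_single (n - 2) (-1) p _ (by omega) (by omega)
            (fun x h1 h2 => by simp [filt, Function.comp] <;> omega)]
        rw [filter_range_down_nil (n - 2) 0 _
            (fun y h1 h2 => by simp [filt, Function.comp] <;> omega)]
        rw [if_neg (by omega), if_pos rfl]
        simp [Option.filter, filt, Prod.ext_iff] <;> omega
      · by_cases hp0 : p = 0
        · subst hp0
          have hn2 : 2 ≤ n := by omega
          rw [filter_range_up_nil 0 n _
              (fun x h1 h2 => by simp [filt, Function.comp] <;> omega)]
          rw [filter_range_up_nil 1 n _
              (fun y h1 h2 => by simp [filt, Function.comp] <;> omega)]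
          rw [filter_range_down_nil (n - 2) (-1) _
              (fun x h1 h2 => by simp [filt, Function.comp] <;> omega)]
          rw [filter_range_down_single (n - 2) 0 q _ (by omega) (by omega)
              (fun y h1 h2 => by simp [filt, Function.comp] <;> omega)]
          rw [if_neg (by omega), if_neg (by omega)]
          by_cases hq1 : q = 1
          · rw [if_neg (by omega), if_pos (by omega)]
            simp [Option.filter, filt, Prod.ext_iff] <;> omega
          · rw [if_pos (by omega)]
            simp [Option.filter, filt, Prod.ext_iff] <;> omega
        · -- interior cell: no assignment on either side
          rw [filter_range_up_nil 0 n _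
              (fun x h1 h2 => by simp [filt, Function.comp] <;> omega)]
          rw [filter_range_up_nil 1 n _
              (fun y h1 h2 => by simp [filt, Function.comp] <;> omega)]
          rw [filter_range_down_nil (n - 2) (-1) _
              (fun x h1 h2 => by simp [filt, Function.comp] <;> omega)]
          rw [filter_range_down_nil (n - 2) 0 _
              (fun y h1 h2 => by simp [filt, Function.comp] <;> omega)]
          rw [if_neg (by omega), if_neg (by omega), if_neg (by omega), if_neg (by omega)]
          simp

theorem matrices_eq (n start : Int) (hn : 1 ≤ n) :
    applyA (LAdef n start) (ZAdef n) = applyA (LBdef n start) (ZBdef n) := by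
  have hZA := shp_ZA n (by omega)
  have hZB := shp_ZB n (by omega)
  have hLAr := LA_range n start
  have hLBr := LB_range n start hn
  apply shp_ext (shp_applyA _ _ hZA hLAr) (shp_applyA _ _ hZB hLBr)
  intro p q hpn hqn
  have hp : (0 : Int) ≤ (p : Int) := by omega
  have hq : (0 : Int) ≤ (q : Int) := by omega
  have hpn' : (p : Int) < n := by omega
  have hqn' : (q : Int) < n := by omega
  have hfa := filters_agree n start p q hn hp hpn' hq hqn'
  rcases hF : (LBdef n start).filter (filt p q) with _ | ⟨a, t⟩
  · rw [applyA_miss hp hq _ _ hLAr (by rw [hfa, hF]),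
        applyA_miss hp hq _ _ hLBr hF]
    rw [entE_zero _ p q ?_, entE_zero _ p q ?_]
    · intro r hr v hv
      unfold ZBdef at hr
      rw [List.mem_map] at hr
      obtain ⟨i, _, rfl⟩ := hr
      exact List.eq_of_mem_replicate hv
    · intro r hr v hv
      unfold ZAdef at hr
      rw [List.mem_map] at hr
      obtain ⟨i, _, rfl⟩ := hr
      rw [List.mem_map] at hv
      obtain ⟨j, _, rfl⟩ := hv
      rfl
  · -- a singleton hit: the filtered list has the form [((p,q),v)]
    have hmem : a ∈ (LBdef n start).filter (filt p q) := by rw [hF]; exact List.mem_cons_self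
    rw [List.mem_filter] at hmem
    have ha1 : a.1 = ((p : Int), (q : Int)) := by
      have := hmem.2
      simp only [filt, Bool.and_eq_true, beq_iff_eq] at this
      exact Prod.ext this.1 this.2
    have ht : t = [] := by
      -- from filter_LA the A-side filter has at most one element
      have := hfa
      rw [filter_LA n start p q hp hpn' hq hqn'] at this
      rw [hF] at this
      cases hg : Option.filter (filt p q) (gA n start p q) with
      | none => rw [hg] at this; simp at this
      | some b => rw [hg] at this; simp at this; exact this.2
    subst ht
    rw [applyA_hit hp hpn' hq hqn' _ _ a.2 hZA hLAr (by rw [hfa, hF, ← ha1]),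
        applyA_hit hp hpn' hq hqn' _ _ a.2 hZB hLBr (by rw [hF, ← ha1])]

-- ===== VERDICT (by name: the statement is the Claim_ definition above) =====
theorem booboo_spec : Claim_equal_booboo := by
  intro n start _ hpre
  unfold Spec_booboo
  rw [booboo_eq, booboo_alt_eq n start hpre, matrices_eq n start hpre]
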